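-- pv_equiv track=rewrite | github.com/wpgoble/AdventOfCode | Python/day1.py | part1
-- ===== SOURCE A (Python) =====
-- from typing import Tuple
--
-- def part1(lines:list) -> Tuple[list, int]:
--     """
--     Creates an ordered list of the number of calories that each elf
--     is holding.
--
--     Parameters:
--         lines (list): list of lines read in from the files
--
--     Returns:
--         amount (list): sorted list in descending order of what each elf is
--             holding
--         ans (int): Most calories being held by an elf
--     """
--     total = 0
--     amount = []
--
--     for line in lines:
--         if line == '\n':
--             line = 'skip_me'
--         try:
--             line = int(line.strip())
--             total += line
--         except:
--             amount.append(total)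
--             total = 0
--     amount = sorted(amount, reverse=True)
--     return amount, amount[0]
-- ===== SOURCE B (Python) =====
-- def part1(lines: list):
--     """Prefix-sum formulation: parse all lines, build a prefix-sum array of the
--     parsed values, list the indices of unparseable separator lines, and read
--     each group's sum off the prefix array as pre[s] - pre[p+1] for consecutive
--     separators (the trailing group after the last separator is dropped, as in A)."""
--     def tryint(s):
--         try:
--             return int(s.strip())
--         except Exception:
--             return None
--
--     vals = [tryint(line) for line in lines]
--     pre = [0]
--     for v in vals:
--         pre.append(pre[-1] + (v if v is not None else 0))
--     seps = [i for i, v in enumerate(vals) if v is None]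
--     amount = sorted((pre[s] - pre[p + 1] for p, s in zip([-1] + seps, seps)), reverse=True)
--     return amount, amount[0]
-- ===== Notes on version B (the rewrite author's own statement) =====
-- stated objective: alternative
-- what changed: A accumulates a running total inside one try/except loop and flushes it at each unparseable line; B builds a prefix-sum array of the parsed values plus the list of separator indices, and obtains each group's sum by subtracting two prefix sums (pre[s]-pre[p+1] for consecutive separators) instead of accumulating per group.
import Mathlib
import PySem

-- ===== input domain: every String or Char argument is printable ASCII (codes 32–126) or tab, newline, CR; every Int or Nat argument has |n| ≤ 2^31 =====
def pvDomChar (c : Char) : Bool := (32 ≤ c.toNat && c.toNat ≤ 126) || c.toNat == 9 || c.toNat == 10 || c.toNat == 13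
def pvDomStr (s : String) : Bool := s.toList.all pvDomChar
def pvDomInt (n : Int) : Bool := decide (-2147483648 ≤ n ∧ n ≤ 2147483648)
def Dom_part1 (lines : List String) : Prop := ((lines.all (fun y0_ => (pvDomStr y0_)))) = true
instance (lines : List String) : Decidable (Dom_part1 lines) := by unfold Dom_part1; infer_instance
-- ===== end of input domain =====

-- B replaces A's flush-a-running-total loop by a prefix-sum array plus separator
-- indices: each group's sum is the difference of two prefix sums.

-- ===== PORT A =====
def stepA (st : Int × List Int) (line : String) : Int × List Int :=
  -- A rebinds line: line = 'skip_me' if line == '\n'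
  match PySem.Int.ofStr? (PySem.Str.strip (if line = "\n" then "skip_me" else line)) with
  | some v => (st.1 + v, st.2)
  | none   => (0, st.2 ++ [st.1])

def part1 (lines : List String) : List Int × Int :=
  let st := lines.foldl stepA (0, [])
  let amount := PySem.List.sorted st.2 (fun x => x) true
  -- amount[0]: Pre_part1 guarantees amount ≠ [], so pyGet? is some
  (amount, (PySem.List.pyGet? amount 0).getD 0)

-- ===== PORT B =====
-- tryint(s) from Source B: int(s.strip()), None on failure
def tryint (s : String) : Option Int := PySem.Int.ofStr? (PySem.Str.strip s)

def part1_alt (lines : List String) : List Int × Int :=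
  let vals := lines.map tryint
  -- pre.append(pre[-1] + (v if v is not None else 0))
  let pre := vals.foldl
    (fun p v => p ++ [(PySem.List.pyGet? p (-1)).getD 0 + v.getD 0]) [(0 : Int)]
  -- seps = [i for i, v in enumerate(vals) if v is None]
  let seps := (PySem.List.enumerate vals 0).filterMap
    (fun iv => if iv.2 = none then some iv.1 else none)
  let amount := PySem.List.sorted
    ((((-1 : Int) :: seps).zip seps).map
      (fun ps => (PySem.List.pyGet? pre ps.2).getD 0
                 - (PySem.List.pyGet? pre (ps.1 + 1)).getD 0))
    (fun x => x) true
  (amount, (PySem.List.pyGet? amount 0).getD 0)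

-- ===== PRECONDITION & SPEC =====
-- Pre_ excludes inputs where every line parses as an int (including []): there the
-- Python A raises IndexError on amount[0] (B raises the same IndexError).
def Pre_part1 (lines : List String) : Prop :=
  ∃ l ∈ lines, PySem.Int.ofStr? (PySem.Str.strip l) = none
instance (lines : List String) : Decidable (Pre_part1 lines) := by unfold Pre_part1; infer_instance

def pvWitness_part1 : List String := ["1", "2", "", "3"]

def Spec_part1 (lines : List String) (out : List Int × Int) : Prop := out = part1_alt lines
instance (lines : List String) (out : List Int × Int) : Decidable (Spec_part1 lines out) := by unfold Spec_part1; infer_instance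

-- ===== CLAIM (what is proved, stated in full; the proofs are below) =====
def Claim_equal_part1 : Prop := ∀ (lines : List String), Dom_part1 lines → Pre_part1 lines → Spec_part1 lines (part1 lines)

-- ===== LEMMAS AND PROOFS =====

-- Common abstract description of the group sums (trailing group dropped).
def gs : Int → List (Option Int) → List Int
  | _, [] => []
  | t, some x :: r => gs (t + x) r
  | t, none :: r => t :: gs 0 r

-- prefix sum of the first i parsed values (None counted as 0)
def pref (vals : List (Option Int)) (i : Nat) : Int :=
  ((vals.take i).map (fun v => v.getD 0)).sum

-- A's '\n' → 'skip_me' rewrite is invisible to parsing: both fail int().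
lemma tryint_if_skip (line : String) :
    PySem.Int.ofStr? (PySem.Str.strip (if line = "\n" then "skip_me" else line))
      = tryint line := by
  by_cases h : line = "\n"
  · subst h; decide
  · simp [h, tryint]

-- A's fold produces exactly the gs group sums.
lemma foldA_snd (lines : List String) (t : Int) (amt : List Int) :
    (lines.foldl stepA (t, amt)).2 = amt ++ gs t (lines.map tryint) := by
  induction lines generalizing t amt with
  | nil => simp [gs]
  | cons line rest ih =>
      simp only [List.foldl_cons, List.map_cons, stepA, tryint_if_skip]
      cases h : tryint line with
      | none => simp [gs, ih]
      | some x => simp [gs, ih]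

-- B's pre-building fold is a scanl of prefix sums.
lemma pre_eq_scanl (vals : List (Option Int)) (acc : List Int) (a : Int) :
    vals.foldl (fun p v => p ++ [(PySem.List.pyGet? p (-1)).getD 0 + v.getD 0]) (acc ++ [a])
      = acc ++ List.scanl (fun t v => t + v.getD 0) a vals := by
  induction vals generalizing acc a with
  | nil => simp
  | cons v r ih =>
      have hlast : PySem.List.pyGet? (acc ++ [a]) (-1) = some a := by
        simp [PySem.List.pyGet?, PySem.List.pyIdx?]
      simp only [List.foldl_cons, List.scanl_cons, hlast, Option.getD_some]
      have := ih (acc ++ [a]) (a + v.getD 0)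
      simpa using this

-- indexing a prefix-sum scanl
lemma scanl_get (vals : List (Option Int)) (a : Int) (i : Nat) (h : i ≤ vals.length) :
    (List.scanl (fun t v => t + v.getD 0) a vals)[i]? = some (a + pref vals i) := by
  induction vals generalizing a i with
  | nil =>
      have : i = 0 := Nat.le_zero.mp h
      subst this
      simp [pref]
  | cons v r ih =>
      cases i with
      | zero => simp [pref]
      | succ j =>
          simp only [List.scanl_cons, List.getElem?_cons_succ]
          rw [ih _ j (by simpa using h)]
          simp [pref, List.take_succ_cons, add_assoc]

lemma pref_succ (vals : List (Option Int)) (k : Nat) (v : Option Int) (r : List (Option Int))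
    (hd : vals.drop k = v :: r) :
    pref vals (k + 1) = pref vals k + v.getD 0 := by
  have hk : k < vals.length := by
    by_contra h
    simp [List.drop_eq_nil_of_le (Nat.le_of_not_lt h)] at hd
  have hv : vals[k]? = some v := by
    rw [← Nat.add_zero k, ← List.getElem?_drop, hd]
    rfl
  simp [pref, List.take_add_one, hv]

-- the key B-side invariant: reading group sums off the prefix array equals gs
lemma zip_map_eq_gs (suffix : List (Option Int)) (vals : List (Option Int))
    (pre : List Int) (k : Nat) (t : Int) (p0 : Int)
    (hdrop : vals.drop k = suffix)
    (hpre : ∀ i : Nat, i ≤ vals.length → (PySem.List.pyGet? pre (i : Int)).getD 0 = pref vals i)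
    (hp0 : (PySem.List.pyGet? pre (p0 + 1)).getD 0 = pref vals k - t) :
    (((p0 :: (PySem.List.enumerate suffix (k : Int)).filterMap
        (fun iv => if iv.2 = none then some iv.1 else none)).zip
      ((PySem.List.enumerate suffix (k : Int)).filterMap
        (fun iv => if iv.2 = none then some iv.1 else none))).map
      (fun ps => (PySem.List.pyGet? pre ps.2).getD 0
                 - (PySem.List.pyGet? pre (ps.1 + 1)).getD 0))
      = gs t suffix := by
  induction suffix generalizing k t p0 with
  | nil => simp [PySem.List.enumerate, gs]
  | cons v r ih =>
      have hk : k < vals.length := by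
        by_contra h
        simp [List.drop_eq_nil_of_le (Nat.le_of_not_lt h)] at hdrop
      have hdrop' : vals.drop (k + 1) = r := by
        have := congrArg (List.drop 1) hdrop
        simpa [List.drop_drop, Nat.add_comm] using this
      have hps : pref vals (k + 1) = pref vals k + v.getD 0 := pref_succ vals k v r hdrop
      cases v with
      | some x =>
          simp only [PySem.List.enumerate_cons]
          have := ih (k + 1) (t + x) p0 hdrop'
            (by rw [hp0, hps]; simp)
          simp only [gs]
          simpa [Nat.cast_add, Nat.cast_one] using this
      | none =>
          simp only [PySem.List.enumerate_cons]
          have hrec := ih (k + 1) 0 (k : Int) hdrop'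
            (by
              have : ((k : Int) + 1) = ((k + 1 : Nat) : Int) := by push_cast; ring
              rw [this, hpre (k + 1) (by omega), hps]
              simp)
          simp only [gs]
          have hhead : (PySem.List.pyGet? pre ((k : Nat) : Int)).getD 0
              - (PySem.List.pyGet? pre (p0 + 1)).getD 0 = t := by
            rw [hpre k (by omega), hp0]; ring
          simp only [List.filterMap_cons, reduceIte, List.zip_cons_cons, List.map_cons,
            List.cons.injEq]
          exact ⟨by simpa using hhead, by simpa [Nat.cast_add, Nat.cast_one] using hrec⟩

-- ===== VERDICT (by name: the statement is the Claim_ definition above) =====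
theorem part1_spec : Claim_equal_part1 := by
  intro lines _ _
  unfold Spec_part1 part1 part1_alt
  have hA := foldA_snd lines 0 []
  have hpre := pre_eq_scanl (lines.map tryint) [] 0
  simp only [List.nil_append] at hA hpre
  have hget : ∀ i : Nat, i ≤ (lines.map tryint).length →
      (PySem.List.pyGet? ((lines.map tryint).foldl
        (fun p v => p ++ [(PySem.List.pyGet? p (-1)).getD 0 + v.getD 0]) [(0 : Int)])
        (i : Int)).getD 0 = pref (lines.map tryint) i := by
    intro i hi
    rw [hpre, PySem.List.pyGet?_natCast, scanl_get _ _ _ hi]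
    simp
  have hB := zip_map_eq_gs (lines.map tryint) (lines.map tryint)
    ((lines.map tryint).foldl
      (fun p v => p ++ [(PySem.List.pyGet? p (-1)).getD 0 + v.getD 0]) [(0 : Int)])
    0 0 (-1) (by simp) hget
    (by rw [show ((-1 : Int) + 1) = ((0 : Nat) : Int) by norm_num, hget 0 (by omega)]
        simp [pref])
  simp only [Nat.cast_zero] at hB
  dsimp only
  rw [hA, hB]
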